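-- pv_equiv track=rewrite | github.com/ravgeetdhillon/fantasyAI | src/ai.py | get_formation
-- ===== SOURCE A (Python) =====
-- def get_formation(team):
--     """
--     Gets the formation of the team.
--     """
--
--     formation = [0, 0, 0]
--     for player in team:
--         if player["position"] == "Defender":
--             formation[0] += 1
--         elif player["position"] == "Midfielder":
--             formation[1] += 1
--         elif player["position"] == "Forward":
--             formation[2] += 1
--
--     formation = [str(x) for x in formation]
--
--     return "-".join(formation)
-- ===== SOURCE B (Python) =====
-- def get_formation(team):
--     """
--     Gets the formation of the team.
--     """
--     counts = [sum(1 for player in team if player["position"] == pos)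
--               for pos in ("Defender", "Midfielder", "Forward")]
--     return "-".join(str(c) for c in counts)
-- ===== Notes on version B (the rewrite author's own statement) =====
-- stated objective: idiomatic
-- what changed: Replaces the single pass with a mutable three-slot counter and if/elif chain by three independent counting scans (one per position in the fixed order) whose results are str-converted and joined with '-'.
import Mathlib
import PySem

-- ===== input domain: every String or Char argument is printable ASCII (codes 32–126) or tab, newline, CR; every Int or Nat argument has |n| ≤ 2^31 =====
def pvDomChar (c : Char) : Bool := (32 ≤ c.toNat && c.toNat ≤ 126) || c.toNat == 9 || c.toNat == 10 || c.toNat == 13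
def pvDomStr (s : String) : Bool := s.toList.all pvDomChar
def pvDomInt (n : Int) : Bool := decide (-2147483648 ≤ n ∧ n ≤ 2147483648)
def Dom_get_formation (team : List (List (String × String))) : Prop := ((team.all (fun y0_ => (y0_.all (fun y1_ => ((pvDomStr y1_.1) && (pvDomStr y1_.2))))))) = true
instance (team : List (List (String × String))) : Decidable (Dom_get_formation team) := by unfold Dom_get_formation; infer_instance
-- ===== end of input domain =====

-- B replaces A's single pass with a mutable 3-slot counter by three independent counting
-- scans, one per position, joined with '-' (objective: idiomatic).

-- dict lookup player["position"] (first match); default "" is only reached outside Pre_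
def pvPos (player : List (String × String)) : String :=
  ((player.find? (fun kv => kv.1 == "position")).map (·.2)).getD ""

-- ===== PORT A =====
def get_formation (team : List (List (String × String))) : String :=
  let f := team.foldl (fun (s : Int × Int × Int) player =>
    if pvPos player == "Defender" then (s.1 + 1, s.2.1, s.2.2)
    else if pvPos player == "Midfielder" then (s.1, s.2.1 + 1, s.2.2)
    else if pvPos player == "Forward" then (s.1, s.2.1, s.2.2 + 1)
    else s) (0, 0, 0)
  PySem.Str.join "-" [PySem.Int.toStr f.1, PySem.Int.toStr f.2.1, PySem.Int.toStr f.2.2]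

-- ===== PORT B =====
def pvCount (team : List (List (String × String))) (pos : String) : Int :=
  team.foldl (fun (acc : Int) player => if pvPos player == pos then acc + 1 else acc) 0

def get_formation_alt (team : List (List (String × String))) : String :=
  let counts := ["Defender", "Midfielder", "Forward"].map (pvCount team)
  PySem.Str.join "-" (counts.map PySem.Int.toStr)

-- ===== PRECONDITION & SPEC =====
-- Pre_ excludes players without a "position" key, on which Python A raises KeyError.
def Pre_get_formation (team : List (List (String × String))) : Prop :=
  (team.all (fun player => player.any (fun kv => kv.1 == "position"))) = true
instance (team : List (List (String × String))) : Decidable (Pre_get_formation team) := by unfold Pre_get_formation; infer_instance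
def pvWitness_get_formation : (List (List (String × String))) :=
  [[("position", "Defender")], [("position", "Forward")], [("position", "Goalkeeper")]]

def Spec_get_formation (team : List (List (String × String))) (out : String) : Prop := out = get_formation_alt team
instance (team : List (List (String × String))) (out : String) : Decidable (Spec_get_formation team out) := by unfold Spec_get_formation; infer_instance

-- ===== CLAIM (what is proved, stated in full; the proofs are below) =====
def Claim_equal_get_formation : Prop := ∀ (team : List (List (String × String))), Dom_get_formation team → Pre_get_formation team → Spec_get_formation team (get_formation team)

-- ===== LEMMAS AND PROOFS =====

theorem pvCount_shift (team : List (List (String × String))) (pos : String) (a : Int) :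
    team.foldl (fun (acc : Int) player => if pvPos player == pos then acc + 1 else acc) a
      = a + pvCount team pos := by
  unfold pvCount
  induction team generalizing a with
  | nil => simp
  | cons p t ih =>
    simp only [List.foldl_cons]
    rw [ih, ih (if pvPos p == pos then 0 + 1 else 0)]
    split <;> ring

theorem pvCount_cons (p : List (String × String)) (t : List (List (String × String))) (pos : String) :
    pvCount (p :: t) pos = (if pvPos p == pos then (1:Int) else 0) + pvCount t pos := by
  have h : pvCount (p :: t) pos
      = t.foldl (fun (acc : Int) player => if pvPos player == pos then acc + 1 else acc)
          (if pvPos p == pos then 0 + 1 else 0) := by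
    unfold pvCount; simp only [List.foldl_cons]
  rw [h, pvCount_shift]; split <;> ring

theorem foldlA_eq (team : List (List (String × String))) (a b c : Int) :
    team.foldl (fun (s : Int × Int × Int) player =>
      if pvPos player == "Defender" then (s.1 + 1, s.2.1, s.2.2)
      else if pvPos player == "Midfielder" then (s.1, s.2.1 + 1, s.2.2)
      else if pvPos player == "Forward" then (s.1, s.2.1, s.2.2 + 1)
      else s) (a, b, c)
    = (a + pvCount team "Defender", b + pvCount team "Midfielder", c + pvCount team "Forward") := by
  induction team generalizing a b c with
  | nil => simp [pvCount]
  | cons p t ih =>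
    simp only [List.foldl_cons]
    rw [pvCount_cons, pvCount_cons, pvCount_cons]
    split
    · next h1 =>
      have h2 : (pvPos p == "Midfielder") = false := by simp_all
      have h3 : (pvPos p == "Forward") = false := by simp_all
      rw [ih]; simp only [h2, h3, Bool.false_eq_true, if_false, Prod.mk.injEq]
      refine ⟨by ring, by ring, by ring⟩
    · next h1 =>
      split
      · next h2 =>
        have h3 : (pvPos p == "Forward") = false := by simp_all
        rw [ih]; simp only [h3, Bool.false_eq_true, if_false, Prod.mk.injEq]
        refine ⟨by ring, by ring, by ring⟩
      · next h2 =>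
        split
        · next h3 =>
          rw [ih]
          simp only [h3, if_true, Prod.mk.injEq]
          refine ⟨by ring, by ring, by ring⟩
        · next h3 =>
          rw [ih]
          simp only [Prod.mk.injEq]
          refine ⟨by ring, by ring, by ring⟩

-- ===== VERDICT (by name: the statement is the Claim_ definition above) =====
theorem get_formation_spec : Claim_equal_get_formation := by
  intro team _ _
  unfold Spec_get_formation get_formation get_formation_alt
  rw [foldlA_eq]
  simp
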